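-- pv_equiv track=rewrite | github.com/FrankZh27/AI | Decision Tree/problem6.py | if_same
-- ===== SOURCE A (Python) =====
-- def if_same(exp):
--     temp_result = ''
--     for i in range(0, len(exp)):
--         if i == 0:
--             temp_result = exp[i][-1]
--         else:
--             if exp[i][-1] != temp_result:
--                 return False
--     return True
-- ===== SOURCE B (Python) =====
-- def if_same(exp):
--     return len({row[-1] for row in exp}) <= 1
-- ===== Notes on version B (the rewrite author's own statement) =====
-- stated objective: idiomatic
-- what changed: B collects every row's last element into a set and decides by counting distinct values (len <= 1), instead of A's indexed loop carrying the first row's last element and early-returning on the first mismatch.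
-- outside the precondition, e.g. on if_same([['a'], ['b'], []]): A returns False, B raises IndexError
import Mathlib
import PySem

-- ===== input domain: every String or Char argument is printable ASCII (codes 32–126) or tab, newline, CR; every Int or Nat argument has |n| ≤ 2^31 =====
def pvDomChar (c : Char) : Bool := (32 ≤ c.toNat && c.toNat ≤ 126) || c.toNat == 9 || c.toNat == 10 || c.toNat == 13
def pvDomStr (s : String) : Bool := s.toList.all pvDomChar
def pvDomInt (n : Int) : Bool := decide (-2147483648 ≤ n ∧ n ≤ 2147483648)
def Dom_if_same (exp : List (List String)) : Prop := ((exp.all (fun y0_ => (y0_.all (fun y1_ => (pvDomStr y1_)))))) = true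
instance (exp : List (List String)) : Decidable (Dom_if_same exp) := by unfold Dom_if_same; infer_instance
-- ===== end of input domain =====

-- B re-implements 'all rows share the same last element' by counting distinct last elements
-- with a set (len <= 1) instead of A's indexed loop with an early return (objective: idiomatic).


-- ===== PORT A =====
-- row[-1]; total form via getD, exact under Pre_ (every row nonempty)
def pvLast (row : List String) : String := (PySem.List.pyGet? row (-1)).getD ""

-- the for-loop over range(0, len(exp)), carrying the index i and temp_result
def if_sameGo : List (List String) → Int → String → Bool
  | [], _, _ => true
  | row :: rest, i, temp =>
    if i == 0 then if_sameGo rest (i + 1) (pvLast row)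
    else if pvLast row ≠ temp then false
    else if_sameGo rest (i + 1) temp

def if_same (exp : List (List String)) : Bool := if_sameGo exp 0 ""

-- ===== PORT B =====
def if_same_alt (exp : List (List String)) : Bool :=
  decide (PySem.Set.len (PySem.Set.ofList (exp.map pvLast)) ≤ 1)

-- ===== PRECONDITION & SPEC =====
-- Pre_ excludes inputs containing an empty row: there B's set comprehension raises IndexError
-- on row[-1], while A either raises the same IndexError or, when a mismatch precedes the empty
-- row, early-returns False before reaching it.
def Pre_if_same (exp : List (List String)) : Prop := ∀ row ∈ exp, row ≠ []
instance (exp : List (List String)) : Decidable (Pre_if_same exp) := by unfold Pre_if_same; infer_instance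
def pvWitness_if_same : List (List String) := [["a", "x"], ["x"]]

def Spec_if_same (exp : List (List String)) (out : Bool) : Prop := out = if_same_alt exp
instance (exp : List (List String)) (out : Bool) : Decidable (Spec_if_same exp out) := by unfold Spec_if_same; infer_instance

-- ===== CLAIM (what is proved, stated in full; the proofs are below) =====
def Claim_equal_if_same : Prop := ∀ (exp : List (List String)), Dom_if_same exp → Pre_if_same exp → Spec_if_same exp (if_same exp)

-- ===== LEMMAS AND PROOFS =====

-- the loop after the first iteration is just "every remaining last element equals temp"
theorem if_sameGo_pos (rest : List (List String)) (i : Int) (temp : String) (hi : 0 < i) :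
    if_sameGo rest i temp = (rest.map pvLast).all (· == temp) := by
  induction rest generalizing i with
  | nil => simp [if_sameGo]
  | cons row rest ih =>
    have h0 : (i == 0) = false := by simp; omega
    by_cases h : pvLast row = temp
    · simp [if_sameGo, h0, h, ih (i + 1) (by omega)]
    · simp [if_sameGo, h0, h]

-- Set.add never shrinks the set
theorem len_le_foldl_add (l s : List String) : s.length ≤ (l.foldl PySem.Set.add s).length := by
  induction l generalizing s with
  | nil => simp
  | cons x l ih =>
    refine le_trans ?_ (ih (PySem.Set.add s x))
    simp only [PySem.Set.add]
    split <;> simp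

-- the distinct elements of (t :: l) number at most 1 iff every element of l equals t
theorem foldl_add_singleton (t : String) (l : List String) :
    ((l.foldl PySem.Set.add [t]).length ≤ 1) ↔ (∀ x ∈ l, x = t) := by
  induction l with
  | nil => simp
  | cons x l ih =>
    by_cases hx : x = t
    · subst hx
      have hadd : PySem.Set.add [x] x = [x] := by simp [PySem.Set.add, PySem.Set.contains]
      simp only [List.foldl_cons, hadd, ih]
      simp
    · have hadd : PySem.Set.add [t] x = [t, x] := by
        simp [PySem.Set.add, PySem.Set.contains, hx]
      have h2 : 2 ≤ (l.foldl PySem.Set.add [t, x]).length := by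
        have := len_le_foldl_add l [t, x]
        simpa using this
      simp only [List.foldl_cons, hadd]
      constructor
      · intro hle; omega
      · intro hall; exact absurd (hall x (by simp)) hx

theorem ofList_len_le_one (t : String) (l : List String) :
    ((PySem.Set.ofList (t :: l)).length ≤ 1) ↔ (∀ x ∈ l, x = t) := by
  have h : PySem.Set.ofList (t :: l) = l.foldl PySem.Set.add [t] := by
    simp [PySem.Set.ofList_eq_foldl, List.foldl_cons, PySem.Set.add]
  rw [h]; exact foldl_add_singleton t l

-- ===== VERDICT (by name: the statement is the Claim_ definition above) =====
theorem if_same_spec : Claim_equal_if_same := by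
  intro exp _ _
  unfold Spec_if_same if_same if_same_alt
  cases exp with
  | nil => simp [if_sameGo, PySem.Set.ofList, PySem.Set.len]
  | cons row rest =>
    simp only [if_sameGo, List.map_cons, PySem.Set.len]
    rw [show ((0 : Int) == 0) = true by decide, if_pos rfl,
      if_sameGo_pos rest (0 + 1) (pvLast row) (by omega)]
    have hiff : (((PySem.Set.ofList (pvLast row :: rest.map pvLast)).length : Int) ≤ 1) ↔
        (∀ x ∈ rest.map pvLast, x = pvLast row) :=
      Iff.trans (by exact_mod_cast Iff.rfl) (ofList_len_le_one _ _)
    simp only [hiff, List.mem_map, forall_exists_index, and_imp,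
      forall_apply_eq_imp_iff₂]
    rw [Bool.eq_iff_iff]
    simp [List.all_eq_true, Function.comp]
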